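-- pv_equiv track=rewrite | github.com/zaczzy/LeetCode | nearestStore.py | nearestStore
-- ===== SOURCE A (Python) =====
-- def nearestStore(stores, houses):
--     nearest = {}
--     curr_store = None  # the closest store with smaller location
--     i = 0
--     j = 0
--     ls = len(stores)
--     lh = len(houses)
--     stores.sort()
--     s_houses = sorted(houses)
--     while i < ls and j < lh:
--         house = s_houses[j]
--         store = stores[i]
--         if house <= store:
--             if curr_store:
--                 nearest[house] = nearest_of_two(house, curr_store, store)
--             else:
--                 nearest[house] = store
--             j += 1
--         else:
--             curr_store = store
--             i += 1
--     if j < lh: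
--         while j < lh:
--             house = s_houses[j]
--             nearest[house] = curr_store
--             j += 1
--     return [nearest[house] for house in houses]
--
-- def nearest_of_two(house, store1, store2):
--     # returns store 1 if equally distant
--     if abs(house - store1) > abs(house - store2):
--         return store2
--     else:
--         return store1
-- ===== SOURCE B (Python) =====
-- import bisect
--
-- def nearestStore(stores, houses):
--     # One bisect lookup per house on the sorted stores (no merge, no dict).
--     # Fixes A's falsy-zero slip: a lower store at location 0 is a real candidate.
--     stores.sort()
--     res = []
--     for h in houses:
--         i = bisect.bisect_left(stores, h)
--         if i == len(stores):
--             res.append(stores[-1])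
--         elif i == 0:
--             res.append(stores[0])
--         elif h - stores[i - 1] <= stores[i] - h:
--             res.append(stores[i - 1])
--         else:
--             res.append(stores[i])
--     return res
-- ===== Notes on version B (the rewrite author's own statement) =====
-- stated objective: idiomatic
-- what changed: Replaces A's two-pointer merge over sorted houses plus a dict keyed by house value with a direct per-house bisect lookup on the sorted stores, fixing A's falsy-zero slip ('if curr_store:') that ignores a lower store at location 0.
-- intended difference: When some house h > 0 has the store at location 0 as its nearest-below candidate and every store >= h is at distance >= h, A's 'if curr_store:' treats the lower store 0 as absent and returns the upper store, while B returns 0, the genuinely nearer (or tie-preferred lower) store, which is the intended value. — e.g. on nearestStore([0, 2], [1]): A returns [2], B returns [0]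
-- outside the precondition, e.g. on nearestStore([], [1]): A returns [None], B raises IndexError
import Mathlib
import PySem

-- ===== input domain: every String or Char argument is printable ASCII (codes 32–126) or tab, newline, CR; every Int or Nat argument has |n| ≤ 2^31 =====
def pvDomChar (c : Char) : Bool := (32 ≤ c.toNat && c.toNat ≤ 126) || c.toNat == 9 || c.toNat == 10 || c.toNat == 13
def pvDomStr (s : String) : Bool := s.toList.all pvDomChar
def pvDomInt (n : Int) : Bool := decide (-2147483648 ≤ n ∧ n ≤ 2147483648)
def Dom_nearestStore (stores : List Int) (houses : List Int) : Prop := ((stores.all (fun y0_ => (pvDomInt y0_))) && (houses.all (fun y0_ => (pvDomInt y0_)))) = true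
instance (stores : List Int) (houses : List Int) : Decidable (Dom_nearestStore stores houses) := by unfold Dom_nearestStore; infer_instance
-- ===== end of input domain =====

-- B replaces A's merge of the two sorted lists (+ dict keyed by house) with a per-house bisect
-- lookup on the sorted stores, and fixes A's falsy-zero slip; both sort `stores` in place (the
-- equivalence proved here is about the return value; B performs the same mutation).


-- ===== PORT A =====
def nearestOfTwo (house store1 store2 : Int) : Int :=
  if |house - store1| > |house - store2| then store2 else store1

-- Python's `if curr_store:` is true iff curr_store is neither None nor 0.
def truthyVal (c : Option Int) (house store : Int) : Int :=
  match c with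
  | some cv => if cv ≠ 0 then nearestOfTwo house cv store else store
  | none => store

-- the two while-loops of A fused into one recursion over (stores-from-i, sorted-houses-from-j);
-- `c.getD 0` in the trailing part stands for curr_store, which is an Int whenever stores ≠ []
-- (the case stores = [] is outside Pre_, where A writes None into the dict).
def nearestLoop : List Int → List Int → Option Int → PySem.Dict Int Int → PySem.Dict Int Int
  | _, [], _, d => d
  | [], house :: hs, c, d => nearestLoop [] hs c (d.insert house (c.getD 0))
  | store :: ss, house :: hs, c, d =>
    if house ≤ store then
      nearestLoop (store :: ss) hs c (d.insert house (truthyVal c house store))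
    else nearestLoop ss (house :: hs) (some store) d
termination_by ss hs _ _ => ss.length + hs.length

def nearestStore (stores : List Int) (houses : List Int) : List Int :=
  let ss := PySem.List.sorted stores (fun x => x)
  let sHouses := PySem.List.sorted houses (fun x => x)
  let nearest := nearestLoop ss sHouses none PySem.Dict.empty
  houses.map (fun house => nearest.getD house 0)

-- ===== PORT B =====
-- one house: bisect_left on the sorted stores, then compare the two neighbours.
-- list indices i, i-1 are in range in their branches; stores[-1] is pyGet? (-1), total via getD 0
-- (the branch is reached with ss = [] only outside Pre_).
def pickNearest (ss : List Int) (h : Int) : Int :=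
  let i := PySem.List.bisectLeft ss h
  if i = ss.length then (PySem.List.pyGet? ss (-1)).getD 0
  else if i = 0 then ss.getD 0 0
  else if h - ss.getD (i - 1) 0 ≤ ss.getD i 0 - h then ss.getD (i - 1) 0
  else ss.getD i 0

def nearestStore_alt (stores : List Int) (houses : List Int) : List Int :=
  let ss := PySem.List.sorted stores (fun x => x)
  houses.foldl (fun res h => res ++ [pickNearest ss h]) []

-- ===== PRECONDITION & SPEC =====
-- Pre_ excludes nonempty `houses` with empty `stores`: there A fills the dict with None and
-- returns a list of Nones, not a list of ints (B raises IndexError there).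
def Pre_nearestStore (stores : List Int) (houses : List Int) : Prop :=
  stores ≠ [] ∨ houses = []
instance (stores : List Int) (houses : List Int) : Decidable (Pre_nearestStore stores houses) := by
  unfold Pre_nearestStore; infer_instance

def pvWitness_nearestStore : List Int × List Int := ([1], [2])

-- When some house h > 0 has the store at location 0 as its nearest-below candidate (no store in
-- (0, h)) and every store ≥ h lies at distance ≥ h, A's `if curr_store:` treats the lower store 0
-- as absent and returns the upper store, while B returns 0, the genuinely nearer (or tie-preferred
-- lower) store, which is the intended value.
def D_nearestStore (stores : List Int) (houses : List Int) : Prop :=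
  (0 : Int) ∈ stores ∧ ∃ h ∈ houses, 0 < h ∧ (∃ s ∈ stores, 2 * h ≤ s) ∧
    ∀ s ∈ stores, s ≤ 0 ∨ 2 * h ≤ s
instance (stores : List Int) (houses : List Int) : Decidable (D_nearestStore stores houses) := by
  unfold D_nearestStore; infer_instance

def Spec_nearestStore (stores : List Int) (houses : List Int) (out : List Int) : Prop :=
  ¬ D_nearestStore stores houses → out = nearestStore_alt stores houses
instance (stores : List Int) (houses : List Int) (out : List Int) : Decidable (Spec_nearestStore stores houses out) := by
  unfold Spec_nearestStore; infer_instance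

def pvDiffWitness_nearestStore : List Int × List Int := ([0, 2], [1])
def pvDiffWitnessOut_nearestStore : (List Int) × (List Int) := ([2], [0])

-- ===== CLAIM =====
def Claim_unchanged_nearestStore : Prop := ∀ (stores : List Int) (houses : List Int), Dom_nearestStore stores houses → Pre_nearestStore stores houses → Spec_nearestStore stores houses (nearestStore stores houses)
def Claim_changed_nearestStore : Prop := Dom_nearestStore (pvDiffWitness_nearestStore.1) (pvDiffWitness_nearestStore.2) ∧ Pre_nearestStore (pvDiffWitness_nearestStore.1) (pvDiffWitness_nearestStore.2) ∧ D_nearestStore (pvDiffWitness_nearestStore.1) (pvDiffWitness_nearestStore.2) ∧ nearestStore (pvDiffWitness_nearestStore.1) (pvDiffWitness_nearestStore.2) = pvDiffWitnessOut_nearestStore.1 ∧ nearestStore_alt (pvDiffWitness_nearestStore.1) (pvDiffWitness_nearestStore.2) = pvDiffWitnessOut_nearestStore.2 ∧ pvDiffWitnessOut_nearestStore.1 ≠ pvDiffWitnessOut_nearestStore.2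
def Claim_exact_nearestStore : Prop := ∀ (stores : List Int) (houses : List Int), Dom_nearestStore stores houses → Pre_nearestStore stores houses → D_nearestStore stores houses → nearestStore stores houses ≠ nearestStore_alt stores houses

-- ===== LEMMAS AND PROOFS =====

-- the value A's loop ends up assigning to one house h, given the lower-neighbour candidate c
-- and the not-yet-consumed (sorted) stores
def fSpec : Option Int → List Int → Int → Int
  | c, [], _ => c.getD 0
  | c, s :: ss, h => if h ≤ s then truthyVal c h s else fSpec (some s) ss h

-- fSpec once the stores are split at h: empty rest → trailing-loop value, else the truthy pick
def fDone (c : Option Int) (R : List Int) (h : Int) : Int :=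
  match R with
  | [] => c.getD 0
  | s :: _ => truthyVal c h s

-- B's pick once the stores are split at h
def fDoneB (L R : List Int) (h : Int) : Int :=
  match R with
  | [] => L.getLast?.getD 0
  | s :: _ =>
    match L.getLast? with
    | none => s
    | some c0 => if h - c0 ≤ s - h then c0 else s

lemma getLast?_cons_or (s : Int) (M : List Int) :
    (s :: M).getLast? = M.getLast?.or (some s) := by
  cases M with
  | nil => simp
  | cons a t =>
    rw [List.getLast?_cons_cons]
    cases hL : (a :: t).getLast? with
    | none => simp [List.getLast?_eq_none_iff] at hL
    | some v => simp

lemma fSpec_eq_fDone (ss : List Int) (c : Option Int) (h : Int) :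
    fSpec c ss h
      = fDone (((ss.takeWhile (fun s => s < h)).getLast?).or c) (ss.dropWhile (fun s => s < h)) h := by
  induction ss generalizing c with
  | nil => simp [fSpec, fDone]
  | cons s ss ih =>
    by_cases hs : h ≤ s
    · have hns : ¬ (s < h) := by omega
      simp [fSpec, hs, hns, fDone]
    · have hlt : s < h := by omega
      simp only [fSpec, if_neg hs, List.takeWhile_cons, List.dropWhile_cons, hlt, decide_true,
        ih (some s)]
      simp [getLast?_cons_or]

-- what A's loop writes: every house of hs maps to fSpec, other keys untouched
lemma nearestLoop_getD (ss hs : List Int) (c : Option Int) (d : PySem.Dict Int Int)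
    (hsrt : hs.Pairwise (· ≤ ·)) (x : Int) :
    (nearestLoop ss hs c d).getD x 0 = if x ∈ hs then fSpec c ss x else d.getD x 0 := by
  induction ss, hs, c, d using nearestLoop.induct with
  | case1 ss c d => cases ss <;> simp [nearestLoop]
  | case2 house hs c d ih =>
    rw [nearestLoop, ih (hsrt.sublist (List.sublist_cons_self _ _))]
    by_cases hx : x ∈ hs
    · simp [hx, fSpec]
    · by_cases he : x = house
      · subst he; simp [hx, fSpec, PySem.Dict.getD_insert_self]
      · simp [hx, he, List.mem_cons, PySem.Dict.getD_insert_of_ne _ _ _ he]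
  | case3 store ss house hs c d hle ih =>
    rw [nearestLoop, if_pos hle, ih (hsrt.sublist (List.sublist_cons_self _ _))]
    by_cases hx : x ∈ hs
    · simp [hx]
    · by_cases he : x = house
      · subst he; simp [hx, fSpec, hle, PySem.Dict.getD_insert_self]
      · simp [hx, he, List.mem_cons, PySem.Dict.getD_insert_of_ne _ _ _ he]
  | case4 store ss house hs c d hle ih =>
    rw [nearestLoop, if_neg hle, ih hsrt]
    by_cases hx : x ∈ house :: hs
    · have hhx : house ≤ x := by
        rcases List.mem_cons.mp hx with rfl | hmem
        · exact le_refl x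
        · exact (List.pairwise_cons.mp hsrt).1 x hmem
      have hxs : ¬ x ≤ store := by omega
      simp [hx, fSpec, hxs]
    · simp [hx]

-- the split of the sorted stores at h, generalized so the parts can be cased on
lemma split_ex (ss : List Int) (h : Int) :
    ∃ L R, ss.takeWhile (fun s => s < h) = L ∧ ss.dropWhile (fun s => s < h) = R ∧ L ++ R = ss :=
  ⟨_, _, rfl, rfl, List.takeWhile_append_dropWhile⟩

lemma bisectLeft_eq_takeWhile (ss : List Int) (h : Int) (hsrt : ss.Pairwise (· ≤ ·)) :
    PySem.List.bisectLeft ss h = (ss.takeWhile (fun s => s < h)).length := by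
  obtain ⟨hle, hlo, hhi⟩ := PySem.List.bisectLeft_spec ss h hsrt
  obtain ⟨L, R, hLr, hRr, hsplit⟩ := split_ex ss h
  have htle : L.length ≤ ss.length := by rw [← hsplit]; simp
  have hpre : L <+: ss := by rw [← hLr]; exact List.takeWhile_prefix _
  have htake : ∀ j (hj : j < L.length), ss[j]'(lt_of_lt_of_le hj htle) < h := by
    intro j hj
    have hget : L[j] = ss[j]'(lt_of_lt_of_le hj htle) := List.IsPrefix.getElem hpre hj
    have hmem : L[j] ∈ L := List.getElem_mem _
    have hx : L[j] ∈ ss.takeWhile (fun s => s < h) := by rw [hLr]; exact hmem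
    have := List.mem_takeWhile_imp hx
    rw [hget] at this
    simpa using this
  rw [hLr]
  cases R with
  | nil =>
    rw [List.append_nil] at hsplit
    have hteq : L.length = ss.length := by rw [hsplit]
    by_contra hne
    have hilt : PySem.List.bisectLeft ss h < ss.length := by omega
    have h1 := hhi _ hilt le_rfl
    have h2 := htake (PySem.List.bisectLeft ss h) (by omega)
    omega
  | cons s R' =>
    have hlt : L.length < ss.length := by rw [← hsplit]; simp
    have hs_at : ss[L.length]? = some s := by
      rw [← hsplit, List.getElem?_append_right (le_refl _)]
      simp
    have hs_eq : ss[L.length]'hlt = s := by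
      have := List.getElem?_eq_getElem hlt
      rw [hs_at] at this
      exact (Option.some.injEq _ _ ▸ this.symm :)
    have hfail : h ≤ ss[L.length]'hlt := by
      rw [hs_eq]
      have hne : ss.dropWhile (fun x : Int => decide (x < h)) ≠ [] := by
        rw [hRr]; simp
      have hhead := List.head_dropWhile_not (fun x : Int => decide (x < h)) hne
      simp only [hRr, List.head_cons] at hhead
      simpa using hhead
    rcases lt_trichotomy (PySem.List.bisectLeft ss h) L.length with hc | hc | hc
    · have := hhi _ (lt_of_lt_of_le hc htle) le_rfl
      have := htake _ hc
      omega
    · exact hc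
    · have := hlo L.length hlt hc
      omega

-- a member of a ≤-sorted list is at most its last element
lemma le_getLast?_of_pairwise (l : List Int) (x y : Int) (hsrt : l.Pairwise (· ≤ ·))
    (hx : x ∈ l) (hy : l.getLast? = some y) : x ≤ y := by
  induction l with
  | nil => cases hx
  | cons a t ih =>
    cases t with
    | nil => simp at hx hy; omega
    | cons b t' =>
      rw [List.getLast?_cons_cons] at hy
      rcases List.mem_cons.mp hx with rfl | hmem
      · exact (List.pairwise_cons.mp hsrt).1 y (List.mem_of_getLast? hy)
      · exact ih (List.pairwise_cons.mp hsrt).2 hmem hy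

-- facts available when the stores split at h with a nonempty right part
lemma split_facts (ss L : List Int) (h s : Int) (R' : List Int)
    (hsrt : ss.Pairwise (· ≤ ·))
    (hLr : ss.takeWhile (fun s => s < h) = L)
    (hRr : ss.dropWhile (fun s => s < h) = s :: R') :
    h ≤ s ∧ (∀ x ∈ L, x < h) ∧ (∀ x ∈ s :: R', s ≤ x) ∧ L.Pairwise (· ≤ ·) ∧ L ++ s :: R' = ss := by
  have hsplit : L ++ s :: R' = ss := by
    rw [← hLr, ← hRr]; exact List.takeWhile_append_dropWhile
  have hsrt' := hsplit ▸ hsrt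
  have hpw := List.pairwise_append.mp (by rw [hsplit]; exact hsrt)
  refine ⟨?_, ?_, ?_, hpw.1, hsplit⟩
  · have hne : ss.dropWhile (fun x : Int => decide (x < h)) ≠ [] := by rw [hRr]; simp
    have hhead := List.head_dropWhile_not (fun x : Int => decide (x < h)) hne
    simp only [hRr, List.head_cons] at hhead
    simpa using hhead
  · intro x hx
    rw [← hLr] at hx
    simpa using List.mem_takeWhile_imp hx
  · intro x hx
    rcases List.mem_cons.mp hx with rfl | hmem
    · exact le_refl x
    · exact (List.pairwise_cons.mp hpw.2.1).1 x hmem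

-- B's pick in split form
lemma pickNearest_eq_fDoneB (ss : List Int) (h : Int) (hsrt : ss.Pairwise (· ≤ ·)) :
    pickNearest ss h = fDoneB (ss.takeWhile (fun s => s < h)) (ss.dropWhile (fun s => s < h)) h := by
  unfold pickNearest
  rw [bisectLeft_eq_takeWhile ss h hsrt]
  obtain ⟨L, R, hLr, hRr, hsplit⟩ := split_ex ss h
  rw [hLr, hRr]
  cases R with
  | nil =>
    rw [List.append_nil] at hsplit
    rw [if_pos (by rw [hsplit]), PySem.List.pyGet?_neg_one]
    simp [fDoneB, hsplit]
  | cons s R' =>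
    have hlen : ss.length = L.length + (R'.length + 1) := by rw [← hsplit]; simp
    rw [if_neg (by omega)]
    have hgetI : ss.getD L.length 0 = s := by
      rw [List.getD_eq_getElem?_getD, ← hsplit, List.getElem?_append_right (le_refl _)]
      simp
    by_cases hL0 : L.length = 0
    · have hLnil : L = [] := List.length_eq_zero_iff.mp hL0
      rw [if_pos hL0, hLnil]
      rw [hLnil] at hsplit
      rw [← hsplit]
      simp [fDoneB]
    · have hLne : L ≠ [] := fun hnil => hL0 (by rw [hnil]; rfl)
      rw [if_neg hL0]
      have hlast : L.getLast? = some (L.getLast hLne) := List.getLast?_eq_some_getLast hLne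
      have hgetI1 : ss.getD (L.length - 1) 0 = L.getLast hLne := by
        rw [List.getD_eq_getElem?_getD, ← hsplit,
          List.getElem?_append_left (by omega)]
        rw [List.getLast?_eq_getElem?] at hlast
        simp [hlast]
      rw [hgetI, hgetI1]
      simp only [fDoneB]
      rw [hlast]

-- the per-house quirk region, phrased over the (sorted) stores list
def quirkAt (ss : List Int) (h : Int) : Prop :=
  (0 : Int) ∈ ss ∧ 0 < h ∧ (∀ s ∈ ss, s < h → s ≤ 0) ∧
    (∃ s ∈ ss, h ≤ s) ∧ (∀ s ∈ ss, h ≤ s → 2 * h ≤ s)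

-- per-house agreement outside the quirk
lemma fSpec_eq_pickNearest (ss : List Int) (h : Int) (hsrt : ss.Pairwise (· ≤ ·))
    (hq : ¬ quirkAt ss h) : fSpec none ss h = pickNearest ss h := by
  rw [fSpec_eq_fDone, pickNearest_eq_fDoneB ss h hsrt, Option.or_none]
  obtain ⟨L, R, hLr, hRr, hsplit⟩ := split_ex ss h
  rw [hLr, hRr]
  cases R with
  | nil => simp [fDone, fDoneB]
  | cons s R' =>
    obtain ⟨hhs, hLlt, hRge, hLsrt, _⟩ := split_facts ss L h s R' hsrt hLr hRr
    cases hlast : L.getLast? with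
    | none => simp [fDone, fDoneB, truthyVal, hlast]
    | some c0 =>
      have hc0L : c0 ∈ L := List.mem_of_getLast? hlast
      have hc0h : c0 < h := hLlt c0 hc0L
      simp only [fDone, fDoneB, truthyVal, hlast]
      by_cases hc00 : c0 = 0
      · -- A ignores the lower store 0; outside the quirk B also returns s
        subst hc00
        rw [if_neg (by simp)]
        have hs2h : s < 2 * h := by
          by_contra hge
          apply hq
          have hmemL : ∀ x ∈ L, x ∈ ss := fun x hx => by
            rw [← hsplit]; exact List.mem_append_left _ hx
          have hmemR : ∀ x ∈ s :: R', x ∈ ss := fun x hx => by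
            rw [← hsplit]; exact List.mem_append_right _ hx
          have hcase : ∀ x ∈ ss, x ∈ L ∨ x ∈ s :: R' := fun x hx => by
            rw [← hsplit] at hx; exact List.mem_append.mp hx
          refine ⟨hmemL 0 hc0L, hc0h, ?_, ⟨s, hmemR s (by simp), hhs⟩, ?_⟩
          · intro x hx hxh
            rcases hcase x hx with hxL | hxR
            · exact le_getLast?_of_pairwise L x 0 hLsrt hxL hlast
            · have := hRge x hxR
              omega
          · intro x hx hxh
            rcases hcase x hx with hxL | hxR
            · have := hLlt x hxL
              have := le_getLast?_of_pairwise L x 0 hLsrt hxL hlast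
              omega
            · have := hRge x hxR
              omega
        rw [if_neg (by omega)]
      · rw [if_pos hc00]
        have e1 : |h - c0| = h - c0 := abs_of_pos (by omega)
        have e2 : |h - s| = s - h := by rw [abs_of_nonpos (by omega)]; ring
        rw [nearestOfTwo, e1, e2]
        split_ifs <;> omega

-- per-house strict disagreement inside the quirk
lemma fSpec_ne_pickNearest (ss : List Int) (h : Int) (hsrt : ss.Pairwise (· ≤ ·))
    (hq : quirkAt ss h) : fSpec none ss h ≠ pickNearest ss h := by
  obtain ⟨h0, hh, hlow, ⟨u, hu, huh⟩, hup⟩ := hq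
  rw [fSpec_eq_fDone, pickNearest_eq_fDoneB ss h hsrt, Option.or_none]
  obtain ⟨L, R, hLr, hRr, hsplit⟩ := split_ex ss h
  rw [hLr, hRr]
  cases R with
  | nil =>
    exfalso
    rw [List.append_nil] at hsplit
    have hu' : u ∈ ss.takeWhile (fun s => s < h) := by rw [hLr, hsplit]; exact hu
    have := List.mem_takeWhile_imp hu'
    simp at this
    omega
  | cons s R' =>
    obtain ⟨hhs, hLlt, hRge, hLsrt, _⟩ := split_facts ss L h s R' hsrt hLr hRr
    -- 0 lies in L, and is its last element
    have h0L : (0 : Int) ∈ L := by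
      rw [← hsplit] at h0
      rcases List.mem_append.mp h0 with hm | hm
      · exact hm
      · exfalso; have := hRge 0 hm; omega
    have hLne : L ≠ [] := by intro hnil; rw [hnil] at h0L; cases h0L
    have hlast : L.getLast? = some (L.getLast hLne) := List.getLast?_eq_some_getLast hLne
    have hlast0 : L.getLast hLne = 0 := by
      have hmem : L.getLast hLne ∈ L := List.getLast_mem hLne
      have h1 : L.getLast hLne < h := hLlt _ hmem
      have h2 : L.getLast hLne ≤ 0 := by
        apply hlow
        · rw [← hsplit]; exact List.mem_append_left _ hmem
        · exact h1
      have h3 : (0 : Int) ≤ L.getLast hLne := le_getLast?_of_pairwise L 0 _ hLsrt h0L hlast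
      omega
    -- the upper neighbour s is at distance ≥ h
    have hs2h : 2 * h ≤ s := by
      apply hup s _ hhs
      rw [← hsplit]; exact List.mem_append_right _ (by simp)
    simp only [fDone, fDoneB, hlast, hlast0, truthyVal]
    rw [if_neg (by simp), if_pos (by omega)]
    omega

-- both programs as maps over houses
lemma nearestStore_eq_map (stores houses : List Int) :
    nearestStore stores houses
      = houses.map (fun h => fSpec none (PySem.List.sorted stores (fun x => x)) h) := by
  unfold nearestStore
  apply List.map_congr_left
  intro h hmem
  rw [nearestLoop_getD _ _ _ _ (PySem.List.sorted_pairwise houses (fun x => x)) h,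
    if_pos ((PySem.List.mem_sorted _ _ _ _).mpr hmem)]

lemma nearestStore_alt_eq_map (stores houses : List Int) :
    nearestStore_alt stores houses
      = houses.map (fun h => pickNearest (PySem.List.sorted stores (fun x => x)) h) := by
  unfold nearestStore_alt
  simpa using PySem.List.foldl_append_singleton_eq_map
    (fun h => pickNearest (PySem.List.sorted stores (fun x => x)) h) houses ([] : List Int)

lemma quirk_iff_D (stores houses : List Int) :
    D_nearestStore stores houses
      ↔ ∃ h ∈ houses, quirkAt (PySem.List.sorted stores (fun x => x)) h := by
  unfold D_nearestStore quirkAt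
  simp only [PySem.List.mem_sorted]
  constructor
  · rintro ⟨h0, h, hh, hpos, ⟨s0, hs0, hs02⟩, hall⟩
    refine ⟨h, hh, h0, hpos, ?_, ⟨s0, hs0, by omega⟩, ?_⟩
    · intro x hx hxh
      rcases hall x hx with h1 | h1 <;> omega
    · intro x hx hxh
      rcases hall x hx with h1 | h1 <;> omega
  · rintro ⟨h, hh, h0, hpos, hlow, ⟨s0, hs0, hs0h⟩, hup⟩
    refine ⟨h0, h, hh, hpos, ⟨s0, hs0, hup s0 hs0 hs0h⟩, ?_⟩
    intro x hx
    by_cases hxh : h ≤ x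
    · exact Or.inr (hup x hx hxh)
    · exact Or.inl (hlow x hx (by omega))

-- ===== VERDICT =====
theorem nearestStore_spec : Claim_unchanged_nearestStore := by
  intro stores houses _ _ hD
  show nearestStore stores houses = nearestStore_alt stores houses
  rw [nearestStore_eq_map, nearestStore_alt_eq_map]
  apply List.map_congr_left
  intro h hmem
  exact fSpec_eq_pickNearest _ _ (PySem.List.sorted_pairwise stores (fun x => x))
    (fun hq => hD ((quirk_iff_D stores houses).mpr ⟨h, hmem, hq⟩))

theorem nearestStore_changed : Claim_changed_nearestStore := by
  unfold Claim_changed_nearestStore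
  refine ⟨by decide, by decide, by decide, ?_, by decide, by decide⟩
  rw [show pvDiffWitness_nearestStore.1 = [0, 2] from rfl,
    show pvDiffWitness_nearestStore.2 = [1] from rfl, nearestStore_eq_map]
  decide

theorem nearestStore_tight : Claim_exact_nearestStore := by
  intro stores houses _ _ hD heq
  obtain ⟨h, hmem, hq⟩ := (quirk_iff_D stores houses).mp hD
  rw [nearestStore_eq_map, nearestStore_alt_eq_map, List.map_inj_left] at heq
  exact fSpec_ne_pickNearest _ _ (PySem.List.sorted_pairwise stores (fun x => x)) hq (heq h hmem)
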